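-- pv_equiv track=rewrite | github.com/etal/cladecompare | cladecomparelib/report.py | wrap_data
-- ===== SOURCE A (Python) =====
-- def wrap_data(data, width=50):
--     """list of atoms -> list of lists, chunked at width"""
--     chunks = []
--     curr, remain = None, data
--     while len(remain) > width:
--         curr, remain = remain[:width], remain[width:]
--         chunks.append(curr)
--     chunks.append(remain)
--     return chunks
-- ===== SOURCE B (Python) =====
-- def wrap_data(data, width=50):
--     """list of atoms -> list of lists, chunked at width"""
--     chunks = []
--     curr = []
--     for atom in data:
--         if len(curr) == width:
--             chunks.append(curr)
--             curr = []
--         curr.append(atom)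
--     chunks.append(curr)
--     return chunks
-- ===== Notes on version B (the rewrite author's own statement) =====
-- stated objective: alternative
-- what changed: B makes one element-wise pass accumulating a current buffer (flushed when it reaches width) instead of repeatedly slicing off the first width atoms and re-copying the tail.
-- outside the precondition, e.g. on wrap_data([1, 2], 0): A does not finish within the time limit, B returns [[], [1, 2]]; on wrap_data([1], -1): A does not finish within the time limit, B returns [[1]]
import Mathlib
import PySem

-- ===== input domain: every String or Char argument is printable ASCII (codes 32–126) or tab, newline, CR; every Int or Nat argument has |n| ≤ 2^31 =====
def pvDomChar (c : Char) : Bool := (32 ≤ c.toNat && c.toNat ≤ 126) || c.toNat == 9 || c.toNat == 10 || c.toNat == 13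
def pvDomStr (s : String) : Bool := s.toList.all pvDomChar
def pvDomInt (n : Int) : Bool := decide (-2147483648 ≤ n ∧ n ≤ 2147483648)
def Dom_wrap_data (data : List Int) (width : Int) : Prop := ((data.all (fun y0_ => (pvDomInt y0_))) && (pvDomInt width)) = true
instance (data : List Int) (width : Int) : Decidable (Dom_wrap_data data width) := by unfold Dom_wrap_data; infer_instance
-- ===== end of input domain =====

-- B replaces A's repeated slice-and-recopy of the remaining list with a single
-- element-wise pass maintaining a current buffer that is flushed at width.


-- ===== PORT A =====
-- while len(remain) > width: curr, remain = remain[:width], remain[width:]; chunks.append(curr)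
-- fuel makes the loop total; under Pre_ (width > 0) data.length steps always suffice
def wrapALoop : Nat → List (List Int) → List Int → Int → List (List Int)
  | 0, chunks, remain, _ => chunks ++ [remain]
  | f + 1, chunks, remain, width =>
    if width < (remain.length : Int) then
      wrapALoop f (chunks ++ [PySem.List.slice remain none (some width)])
        (PySem.List.slice remain (some width) none) width
    else chunks ++ [remain]

def wrap_data (data : List Int) (width : Int) : List (List Int) :=
  wrapALoop data.length [] data width

-- ===== PORT B =====
-- for atom in data: if len(curr) == width: chunks.append(curr); curr = []; curr.append(atom)
def wrapBStep (width : Int) (p : List (List Int) × List Int) (atom : Int) :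
    List (List Int) × List Int :=
  if (p.2.length : Int) = width then (p.1 ++ [p.2], [atom]) else (p.1, p.2 ++ [atom])

def wrap_data_alt (data : List Int) (width : Int) : List (List Int) :=
  let p := data.foldl (wrapBStep width) ([], [])
  p.1 ++ [p.2]

-- ===== PRECONDITION & SPEC =====
-- Pre_ excludes exactly the inputs on which A's while-loop never terminates:
-- width ≤ 0 with nonempty data, and negative width even with empty data.
def Pre_wrap_data (data : List Int) (width : Int) : Prop :=
  0 < width ∨ (data = [] ∧ width = 0)
instance (data : List Int) (width : Int) : Decidable (Pre_wrap_data data width) := by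
  unfold Pre_wrap_data; infer_instance

def pvWitness_wrap_data : List Int × Int := ([1, 2, 3], 2)

def Spec_wrap_data (data : List Int) (width : Int) (out : List (List Int)) : Prop :=
  out = wrap_data_alt data width
instance (data : List Int) (width : Int) (out : List (List Int)) :
    Decidable (Spec_wrap_data data width out) := by unfold Spec_wrap_data; infer_instance

-- ===== CLAIM (what is proved, stated in full; the proofs are below) =====
def Claim_equal_wrap_data : Prop := ∀ (data : List Int) (width : Int),
  Dom_wrap_data data width → Pre_wrap_data data width →
  Spec_wrap_data data width (wrap_data data width)

-- ===== LEMMAS AND PROOFS =====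

-- the fold never flushes while the buffer plus the rest fits in width
theorem wrapB_fill (width : Int) : ∀ (data curr : List Int) (res : List (List Int)),
    (curr.length : Int) + data.length ≤ width →
    data.foldl (wrapBStep width) (res, curr) = (res, curr ++ data) := by
  intro data
  induction data with
  | nil => intro curr res _; simp
  | cons a rest ih =>
    intro curr res h
    have hne : ¬ ((curr.length : Int) = width) := by
      simp at h; omega
    simp only [List.foldl_cons, wrapBStep]
    rw [if_neg hne, ih (curr ++ [a]) res (by simp at h ⊢; omega)]
    simp

-- the accumulated chunks are a pure prefix of the fold's first component
theorem wrapB_prefix (width : Int) : ∀ (data curr : List Int) (res : List (List Int)),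
    data.foldl (wrapBStep width) (res, curr) =
      (res ++ (data.foldl (wrapBStep width) ([], curr)).1,
       (data.foldl (wrapBStep width) ([], curr)).2) := by
  intro data
  induction data with
  | nil => intro curr res; simp
  | cons a rest ih =>
    intro curr res
    by_cases hc : (curr.length : Int) = width
    · simp only [List.foldl_cons, wrapBStep, if_pos hc, List.nil_append]
      rw [ih [a] (res ++ [curr]), ih [a] [curr]]
      simp
    · simp only [List.foldl_cons, wrapBStep, if_neg hc]
      rw [ih (curr ++ [a]) res]

-- once the input overflows the buffer, the fold flushes one full chunk and restarts
theorem wrapB_overflow (width : Int) (hw : 0 < width) :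
    ∀ (data curr : List Int) (res : List (List Int)),
    (curr.length : Int) < width → width < (curr.length : Int) + data.length →
    data.foldl (wrapBStep width) (res, curr) =
      (data.drop (width.toNat - curr.length)).foldl (wrapBStep width)
        (res ++ [curr ++ data.take (width.toNat - curr.length)], []) := by
  intro data
  induction data with
  | nil => intro curr res h1 h2; simp at h2; omega
  | cons a rest ih =>
    intro curr res h1 h2
    have hne : ¬ ((curr.length : Int) = width) := by omega
    simp only [List.foldl_cons, wrapBStep, if_neg hne]
    by_cases hc : (curr.length : Int) + 1 = width
    · -- the buffer just became full
      have ht : width.toNat - curr.length = 1 := by omega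
      rw [ht]
      simp only [List.drop_succ_cons, List.drop_zero]
      cases rest with
      | nil => simp at h2; omega
      | cons b rest' =>
        have hfull : ((curr ++ [a]).length : Int) = width := by simp; omega
        have hz : ¬ ((([] : List Int).length : Int) = width) := by simp; omega
        simp only [List.foldl_cons, wrapBStep, if_pos hfull, if_neg hz]
        simp
    · have h1' : ((curr ++ [a]).length : Int) < width := by simp; omega
      have h2' : width < ((curr ++ [a]).length : Int) + rest.length := by simp at h2 ⊢; omega
      rw [ih (curr ++ [a]) res h1' h2']
      have ht : width.toNat - curr.length = (width.toNat - (curr ++ [a]).length) + 1 := by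
        simp; omega
      rw [ht]
      simp only [List.take_succ_cons, List.drop_succ_cons]
      simp

theorem wrapB_small (width : Int) (data : List Int) (h : (data.length : Int) ≤ width) :
    wrap_data_alt data width = [data] := by
  unfold wrap_data_alt
  rw [wrapB_fill width data [] [] (by simpa using h)]
  simp

theorem wrapB_split (width : Int) (hw : 0 < width) (data : List Int)
    (h : width < (data.length : Int)) :
    wrap_data_alt data width =
      data.take width.toNat :: wrap_data_alt (data.drop width.toNat) width := by
  unfold wrap_data_alt
  rw [wrapB_overflow width hw data [] [] (by simpa using hw) (by simpa using h)]
  simp only [List.length_nil, Nat.sub_zero, List.nil_append]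
  rw [wrapB_prefix width (data.drop width.toNat) [] [data.take width.toNat]]
  simp

theorem wrapA_main (width : Int) (hw : 0 < width) :
    ∀ (fuel : Nat) (remain : List Int) (chunks : List (List Int)),
    remain.length ≤ fuel →
    wrapALoop fuel chunks remain width = chunks ++ wrap_data_alt remain width := by
  intro fuel
  induction fuel with
  | zero =>
    intro remain chunks h
    have : remain = [] := List.eq_nil_of_length_eq_zero (Nat.le_zero.mp h)
    subst this
    simp [wrapALoop, wrap_data_alt]
  | succ f ih =>
    intro remain chunks h
    by_cases hlt : width < (remain.length : Int)
    · have h0w : (0 : Int) ≤ width := le_of_lt hw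
      rw [wrapALoop, if_pos hlt, PySem.List.slice_to remain h0w, PySem.List.slice_from remain h0w]
      have hwn : 1 ≤ width.toNat := by omega
      have hlen : (remain.drop width.toNat).length ≤ f := by
        simp [List.length_drop]; omega
      rw [ih (remain.drop width.toNat) (chunks ++ [remain.take width.toNat]) hlen]
      rw [wrapB_split width hw remain hlt]
      simp
    · rw [wrapALoop, if_neg hlt, wrapB_small width remain (le_of_not_gt hlt)]

-- ===== VERDICT (by name: the statement is the Claim_ definition above) =====
theorem wrap_data_spec : Claim_equal_wrap_data := by
  intro data width _ hpre
  unfold Spec_wrap_data wrap_data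
  rcases hpre with hw | ⟨hd, hwz⟩
  · exact wrapA_main width hw data.length data [] (le_refl _)
  · subst hd; subst hwz; decide
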